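-- pv_equiv track=rewrite | github.com/rbonghi/jetson_stats | jtop/core/engine.py | _bpmp_pick_clock
-- ===== SOURCE A (Python) =====
-- _BPMP_TOKEN_MAP = {
--     # token -> list of preferred names (first match wins). Fallback: substring search
--     "APE": ["ape"],
--     "VIC": ["vic", "nafll_vic"],
--     "NVENC": ["nvenc", "msenc", "nafll_nvenc", "nafll_msenc"],
--     "MSENC": ["msenc", "nvenc", "nafll_msenc", "nafll_nvenc"],
--     "NVDEC": ["nvdec", "nafll_nvdec"],
--     "NVJPG": ["nvjpg", "nvjpg0", "nafll_nvjpg"],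
--     "NVJPG1": ["nvjpg1"],
--     "PVA": ["pva", "pva0"],
--     "PVA0": ["pva0", "pva"],
--     "OFA": ["ofa"],
--     "SE": ["se", "se0", "se1"],
--     "CVNAS": ["cvnas"],
--     "DLA": ["dla", "dla0", "dla1"],  # not present on Thor
-- }
--
-- def _bpmp_pick_clock(idx, token):
--     """
--     Resolve a logical engine token (e.g., 'VIC') to a concrete clock name in the BPMP index.
--     Prefer explicit names in _BPMP_TOKEN_MAP; otherwise substring search.
--     """
--     prefs = _BPMP_TOKEN_MAP.get(token, [])
--     # Try preferred names first (case-insensitive)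
--     for n in prefs:
--         for key in idx.keys():
--             if n.lower() == key.lower():
--                 return key
--     # Fallback: substring search (stable ordering)
--     lowtok = token.lower()
--     return next((name for name in idx.keys() if lowtok in name.lower()), None)
-- ===== SOURCE B (Python) =====
-- _BPMP_TOKEN_MAP = {
--     "APE": ["ape"],
--     "VIC": ["vic", "nafll_vic"],
--     "NVENC": ["nvenc", "msenc", "nafll_nvenc", "nafll_msenc"],
--     "MSENC": ["msenc", "nvenc", "nafll_msenc", "nafll_nvenc"],
--     "NVDEC": ["nvdec", "nafll_nvdec"],
--     "NVJPG": ["nvjpg", "nvjpg0", "nafll_nvjpg"],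
--     "NVJPG1": ["nvjpg1"],
--     "PVA": ["pva", "pva0"],
--     "PVA0": ["pva0", "pva"],
--     "OFA": ["ofa"],
--     "SE": ["se", "se0", "se1"],
--     "CVNAS": ["cvnas"],
--     "DLA": ["dla", "dla0", "dla1"],
-- }
--
-- def _bpmp_pick_clock(idx, token):
--     # Single-pass argmin: score every key once (preferred-name index, then
--     # substring match as rank p, else p+1 = no match) and keep the
--     # best-ranked earliest key; no staged re-scans of idx.
--     prefs = _BPMP_TOKEN_MAP.get(token, [])
--     lowtok = token.lower()
--     p = len(prefs)
--
--     def rank(low):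
--         r = 0
--         for n in prefs:
--             if n.lower() == low:
--                 return r
--             r += 1
--         return p if lowtok in low else p + 1
--
--     best, best_rank = None, p + 1
--     for key in idx.keys():
--         r = rank(key.lower())
--         if r < best_rank:
--             best, best_rank = key, r
--     return best
-- ===== Notes on version B (the rewrite author's own statement) =====
-- stated objective: alternative
-- what changed: B replaces A's staged searches (one scan of idx per preferred name, then a substring scan) by a single argmin pass over idx: each key gets a numeric rank (preferred-name index, p for a substring match, p+1 for none) and the earliest best-ranked key is kept.
import Mathlib
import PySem

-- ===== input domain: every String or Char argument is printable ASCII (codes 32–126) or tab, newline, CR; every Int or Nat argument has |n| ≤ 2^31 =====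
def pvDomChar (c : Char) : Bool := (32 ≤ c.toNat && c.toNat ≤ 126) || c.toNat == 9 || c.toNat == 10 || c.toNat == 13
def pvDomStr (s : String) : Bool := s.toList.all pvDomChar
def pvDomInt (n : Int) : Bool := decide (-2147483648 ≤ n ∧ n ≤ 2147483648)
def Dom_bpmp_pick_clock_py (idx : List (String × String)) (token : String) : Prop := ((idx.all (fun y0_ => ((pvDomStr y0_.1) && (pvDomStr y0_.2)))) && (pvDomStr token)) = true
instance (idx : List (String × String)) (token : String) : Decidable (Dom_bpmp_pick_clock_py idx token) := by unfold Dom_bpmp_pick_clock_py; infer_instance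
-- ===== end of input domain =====

-- B replaces A's staged searches (per-pref scans, then a substring scan) by a single argmin
-- pass that scores every key once; return values proved identical (alternative decomposition).

-- shared module constant _BPMP_TOKEN_MAP
def bpmpTokenMap : PySem.Dict String (List String) := PySem.Dict.ofList [
  ("APE", ["ape"]),
  ("VIC", ["vic", "nafll_vic"]),
  ("NVENC", ["nvenc", "msenc", "nafll_nvenc", "nafll_msenc"]),
  ("MSENC", ["msenc", "nvenc", "nafll_msenc", "nafll_nvenc"]),
  ("NVDEC", ["nvdec", "nafll_nvdec"]),
  ("NVJPG", ["nvjpg", "nvjpg0", "nafll_nvjpg"]),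
  ("NVJPG1", ["nvjpg1"]),
  ("PVA", ["pva", "pva0"]),
  ("PVA0", ["pva0", "pva"]),
  ("OFA", ["ofa"]),
  ("SE", ["se", "se0", "se1"]),
  ("CVNAS", ["cvnas"]),
  ("DLA", ["dla", "dla0", "dla1"])]

-- ===== PORT A =====
-- A's outer loop 'for n in prefs' with the inner early-return scan over idx.keys()
def aPrefLoop (idx : List (String × String)) : List String → Option String
  | [] => none
  | n :: rest =>
    match idx.find? (fun kv => PySem.Str.lower n == PySem.Str.lower kv.1) with
    | some kv => some kv.1
    | none => aPrefLoop idx rest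

def bpmp_pick_clock_py (idx : List (String × String)) (token : String) : Option String :=
  let prefs := (bpmpTokenMap.get? token).getD []
  match aPrefLoop idx prefs with
  | some k => some k
  | none =>
    let lowtok := PySem.Str.lower token
    (idx.find? (fun kv => PySem.Str.isIn lowtok (PySem.Str.lower kv.1))).map (·.1)

-- ===== PORT B =====
-- B's inner 'for n in prefs: … r += 1' loop of rank(low)
def rankOf : List String → String → Nat
  | [], _ => 0
  | n :: rest, low => if PySem.Str.lower n == low then 0 else 1 + rankOf rest low

-- B's rank(low): pref index, else p on substring match, else p + 1
def keyRank (prefs : List String) (lowtok low : String) : Nat :=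
  let r := rankOf prefs low
  if r < prefs.length then r
  else if PySem.Str.isIn lowtok low then prefs.length else prefs.length + 1

-- B's single pass over idx.keys() keeping (best, best_rank)
def bestLoop (prefs : List String) (lowtok : String) :
    List (String × String) → Option String × Nat → Option String × Nat
  | [], b => b
  | kv :: rest, b =>
      let r := keyRank prefs lowtok (PySem.Str.lower kv.1)
      bestLoop prefs lowtok rest (if r < b.2 then (some kv.1, r) else b)

def bpmp_pick_clock_py_alt (idx : List (String × String)) (token : String) : Option String :=
  let prefs := (bpmpTokenMap.get? token).getD []
  let lowtok := PySem.Str.lower token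
  (bestLoop prefs lowtok idx (none, prefs.length + 1)).1

-- ===== PRECONDITION & SPEC =====
def Spec_bpmp_pick_clock_py (idx : List (String × String)) (token : String) (out : Option String) : Prop := out = bpmp_pick_clock_py_alt idx token
instance (idx : List (String × String)) (token : String) (out : Option String) : Decidable (Spec_bpmp_pick_clock_py idx token out) := by unfold Spec_bpmp_pick_clock_py; infer_instance

-- ===== CLAIM (what is proved, stated in full; the proofs are below) =====
def Claim_equal_bpmp_pick_clock_py : Prop := ∀ (idx : List (String × String)) (token : String), Dom_bpmp_pick_clock_py idx token → Spec_bpmp_pick_clock_py idx token (bpmp_pick_clock_py idx token)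

-- ===== LEMMAS AND PROOFS =====

-- rank on a cons list of preferred names: 0 on a head match, else shifted by one
theorem keyRank_cons (n : String) (prefs : List String) (lowtok low : String) :
    keyRank (n :: prefs) lowtok low
      = if PySem.Str.lower n == low then 0 else 1 + keyRank prefs lowtok low := by
  by_cases h : PySem.Str.lower n == low
  · simp [keyRank, rankOf, h]
  · simp only [keyRank, rankOf, h, List.length_cons]
    split_ifs <;> omega

-- once the threshold is 0, the pass changes nothing
theorem bestLoop_zero (prefs : List String) (lowtok : String) (idx : List (String × String))
    (b : Option String) : bestLoop prefs lowtok idx (b, 0) = (b, 0) := by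
  induction idx with
  | nil => rfl
  | cons kv rest ih => simp [bestLoop, ih]

-- the first rank-0 key wins the whole pass
theorem bestLoop_of_find_zero (prefs : List String) (lowtok : String)
    (idx : List (String × String)) (kv : String × String)
    (h : idx.find? (fun kv => keyRank prefs lowtok (PySem.Str.lower kv.1) == 0) = some kv) :
    ∀ (o : Option String) (t : Nat), 1 ≤ t →
      (bestLoop prefs lowtok idx (o, t)).1 = some kv.1 := by
  induction idx with
  | nil => simp at h
  | cons hd rest ih =>
    intro o t ht
    rw [List.find?_cons] at h
    cases hb : (keyRank prefs lowtok (PySem.Str.lower hd.1) == 0) with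
    | true =>
      simp [hb] at h
      subst h
      have h0 : keyRank prefs lowtok (PySem.Str.lower hd.1) = 0 := by simpa using hb
      have hpos : 0 < t := ht
      simp [bestLoop, h0, hpos, bestLoop_zero]
    | false =>
      simp [hb] at h
      have hz : keyRank prefs lowtok (PySem.Str.lower hd.1) ≠ 0 := by simpa using hb
      simp only [bestLoop]
      split_ifs with hlt
      · exact ih h _ _ (by omega)
      · exact ih h _ _ ht

-- if no key updates the accumulator, the pass is the identity
theorem bestLoop_none (prefs : List String) (lowtok : String) (idx : List (String × String))
    (b : Option String × Nat)
    (h : ∀ kv ∈ idx, ¬ keyRank prefs lowtok (PySem.Str.lower kv.1) < b.2) :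
    bestLoop prefs lowtok idx b = b := by
  induction idx with
  | nil => rfl
  | cons hd rest ih =>
    simp only [bestLoop]
    rw [if_neg (h hd (by simp))]
    exact ih fun kv hkv => h kv (by simp [hkv])

-- shifting every rank by one shifts the threshold by one and keeps the chosen key
theorem bestLoop_shift (n : String) (prefs : List String) (lowtok : String)
    (idx : List (String × String))
    (h : ∀ kv ∈ idx, keyRank (n :: prefs) lowtok (PySem.Str.lower kv.1)
          = 1 + keyRank prefs lowtok (PySem.Str.lower kv.1)) :
    ∀ (o : Option String) (t : Nat),
      (bestLoop (n :: prefs) lowtok idx (o, t + 1)).1 = (bestLoop prefs lowtok idx (o, t)).1 := by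
  induction idx with
  | nil => intro o t; rfl
  | cons hd rest ih =>
    intro o t
    have hh := h hd (by simp)
    have hrest : ∀ kv ∈ rest, keyRank (n :: prefs) lowtok (PySem.Str.lower kv.1)
        = 1 + keyRank prefs lowtok (PySem.Str.lower kv.1) := fun kv hkv => h kv (by simp [hkv])
    simp only [bestLoop, hh]
    by_cases hlt : keyRank prefs lowtok (PySem.Str.lower hd.1) < t
    · rw [if_pos (by omega), if_pos hlt,
        Nat.add_comm 1 (keyRank prefs lowtok (PySem.Str.lower hd.1))]
      exact ih hrest _ _
    · rw [if_neg (by omega), if_neg hlt]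
      exact ih hrest _ _

-- staged searches = single argmin pass, for any list of preferred names
theorem main_eq (prefs : List String) (lowtok : String) (idx : List (String × String)) :
    (match aPrefLoop idx prefs with
     | some k => some k
     | none => (idx.find? (fun kv => PySem.Str.isIn lowtok (PySem.Str.lower kv.1))).map (·.1))
      = (bestLoop prefs lowtok idx (none, prefs.length + 1)).1 := by
  induction prefs with
  | nil =>
    simp only [aPrefLoop, List.length_nil, Nat.zero_add]
    have hp : (fun kv : String × String => keyRank [] lowtok (PySem.Str.lower kv.1) == 0)
        = (fun kv : String × String => PySem.Str.isIn lowtok (PySem.Str.lower kv.1)) := by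
      funext kv
      simp only [keyRank, rankOf]
      cases hc : PySem.Str.isIn lowtok (PySem.Str.lower kv.1) <;> simp
    cases hf : idx.find? (fun kv => PySem.Str.isIn lowtok (PySem.Str.lower kv.1)) with
    | some kv =>
      rw [bestLoop_of_find_zero [] lowtok idx kv (by rw [hp]; exact hf) none 1 le_rfl]
      simp
    | none =>
      have hall := List.find?_eq_none.mp hf
      rw [bestLoop_none [] lowtok idx (none, 1) (by
        intro kv hkv
        have hc : PySem.Str.isIn lowtok (PySem.Str.lower kv.1) = false := by
          simpa using hall kv hkv
        simp only [keyRank, rankOf]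
        rw [hc]
        simp)]
      simp
  | cons n rest ih =>
    simp only [aPrefLoop]
    cases hf : idx.find? (fun kv => PySem.Str.lower n == PySem.Str.lower kv.1) with
    | some kv =>
      have hp : (fun kv : String × String => keyRank (n :: rest) lowtok (PySem.Str.lower kv.1) == 0)
          = (fun kv : String × String => PySem.Str.lower n == PySem.Str.lower kv.1) := by
        funext kv
        by_cases h : PySem.Str.lower n == PySem.Str.lower kv.1 <;> simp [keyRank_cons, h]
      rw [bestLoop_of_find_zero (n :: rest) lowtok idx kv (by rw [hp]; exact hf) none _ (by omega)]
    | none =>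
      have hall := List.find?_eq_none.mp hf
      have hshift : ∀ kv ∈ idx, keyRank (n :: rest) lowtok (PySem.Str.lower kv.1)
          = 1 + keyRank rest lowtok (PySem.Str.lower kv.1) := by
        intro kv hkv
        have := hall kv hkv
        simp only [Bool.not_eq_true] at this
        rw [keyRank_cons, if_neg (by simp [this])]
      rw [show (n :: rest).length + 1 = (rest.length + 1) + 1 by simp]
      rw [bestLoop_shift n rest lowtok idx hshift none (rest.length + 1)]
      exact ih

-- ===== VERDICT (by name: the statement is the Claim_ definition above) =====
theorem bpmp_pick_clock_py_spec : Claim_equal_bpmp_pick_clock_py := by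
  intro idx token _
  unfold Spec_bpmp_pick_clock_py bpmp_pick_clock_py bpmp_pick_clock_py_alt
  exact main_eq _ _ idx
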